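-- pv_equiv track=rewrite | github.com/cedson22/Exercices-cours-coder-en-Python-Fun-mooc | UpyLab5.15.py | correcteur
-- ===== SOURCE A (Python) =====
-- def distance_mots(mot1,mot2):
--     '''Cette fonction calcule le nombre minimum de fois où il faut modifier une
--     lettre de mot_1 pour obtenir mot_2, sans changer leur ordre (distance de Hamming)'''
--     cont = 0
--     for i,j in zip(mot2,range(len(mot1))):
--         if i != mot1[j] :
--             cont +=1
--         else:
--             continue
--     return cont
--
-- def correcteur(mot, liste_mots):
--     """ Cette fonction est un utilise un correcteur orthographique"""
--     v =[]
--     v1 = []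
--     for j in liste_mots :
--         if len(mot) == len(j):
--             v.append(distance_mots(mot,j))
--             v1.append(j)
--         else:
--             continue
--     c = min(v)
--     for i,a in enumerate (v):
--         if c == v[i]:
--             return v1[i]
--             break
-- ===== SOURCE B (Python) =====
-- def correcteur(mot, liste_mots):
--     """Correcteur orthographique: premier mot de meme longueur a distance de Hamming minimale."""
--     best = None
--     best_d = None
--     for w in liste_mots:
--         if len(w) != len(mot):
--             continue
--         d = sum(a != b for a, b in zip(mot, w))
--         if best is None or d < best_d:
--             best, best_d = w, d
--     if best is None:
--         raise ValueError("aucun mot de meme longueur")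
--     return best
-- ===== Notes on version B (the rewrite author's own statement) =====
-- stated objective: simpler
-- what changed: One pass keeping a running (best word, best distance) with strict '<' replaces A's two parallel lists, min() and a second rescan for the first index achieving the minimum.
import Mathlib
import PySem

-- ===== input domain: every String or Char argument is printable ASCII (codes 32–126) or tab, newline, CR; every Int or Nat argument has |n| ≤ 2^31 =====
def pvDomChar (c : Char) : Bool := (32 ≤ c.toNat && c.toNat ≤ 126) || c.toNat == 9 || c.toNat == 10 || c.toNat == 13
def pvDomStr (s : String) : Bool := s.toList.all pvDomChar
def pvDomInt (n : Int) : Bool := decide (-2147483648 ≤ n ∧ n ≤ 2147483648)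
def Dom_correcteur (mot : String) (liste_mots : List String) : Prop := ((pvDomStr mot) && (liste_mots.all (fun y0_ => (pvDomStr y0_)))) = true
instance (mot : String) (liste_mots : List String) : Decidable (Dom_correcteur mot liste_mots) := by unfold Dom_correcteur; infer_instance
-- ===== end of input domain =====

-- B replaces A's two parallel lists + min() + rescan by one pass keeping the running first minimum (return value only; neither mutates its arguments).

-- ===== PORT A =====
-- zip(mot2, range(len(mot1))) pairs mot2's chars with indices 0..len(mot1)-1 and reads mot1[j]:
-- exactly the elementwise zip of the two char lists (all indices in range), so this is exact.
def distance_mots (mot1 mot2 : String) : Int :=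
  (mot2.toList.zip mot1.toList).foldl
    (fun cont p => if p.1 ≠ p.2 then cont + 1 else cont) 0

-- A's final loop: first i with c == v[i] returns v1[i]; scanned as the zipped pairs (v[i], v1[i]).
-- The [] case is unreachable in A (min guarantees a match); "" stands for Python's fall-through None.
def pickA : Int → List (Int × String) → String
  | _, [] => ""
  | c, (dv, w) :: rest => if c = dv then w else pickA c rest

def correcteur (mot : String) (liste_mots : List String) : String :=
  let s := liste_mots.foldl
    (fun (s : List Int × List String) j =>
      if mot.length = j.length then (s.1 ++ [distance_mots mot j], s.2 ++ [j]) else s)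
    ([], [])
  match PySem.List.min? s.1 (fun x => x) with
  | none => ""   -- min([]) raises ValueError in Python: excluded by Pre_correcteur
  | some c => pickA c (s.1.zip s.2)

-- ===== PORT B =====
def hamming (mot w : String) : Int :=
  (mot.toList.zip w.toList).foldl
    (fun d p => if p.1 ≠ p.2 then d + 1 else d) 0

def correcteur_alt (mot : String) (liste_mots : List String) : String :=
  match liste_mots.foldl
    (fun (best : Option (String × Int)) w =>
      if w.length = mot.length then
        let d := hamming mot w
        match best with
        | none => some (w, d)
        | some (_, bd) => if d < bd then some (w, d) else best
      else best) none with
  | none => ""   -- raise ValueError in Python: excluded by Pre_correcteur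
  | some (w, _) => w

-- ===== PRECONDITION & SPEC =====
-- A raises ValueError (min of an empty list) exactly when no word of liste_mots has mot's length; B raises there too.
def Pre_correcteur (mot : String) (liste_mots : List String) : Prop :=
  (liste_mots.any (fun w => w.length == mot.length)) = true
instance (mot : String) (liste_mots : List String) : Decidable (Pre_correcteur mot liste_mots) := by
  unfold Pre_correcteur; infer_instance

def pvWitness_correcteur : String × List String := ("chat", ["chut", "chien", "char"])

def Spec_correcteur (mot : String) (liste_mots : List String) (out : String) : Prop := out = correcteur_alt mot liste_mots
instance (mot : String) (liste_mots : List String) (out : String) : Decidable (Spec_correcteur mot liste_mots out) := by unfold Spec_correcteur; infer_instance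

-- ===== CLAIM (what is proved, stated in full; the proofs are below) =====
def Claim_equal_correcteur : Prop := ∀ (mot : String) (liste_mots : List String), Dom_correcteur mot liste_mots → Pre_correcteur mot liste_mots → Spec_correcteur mot liste_mots (correcteur mot liste_mots)

-- ===== LEMMAS AND PROOFS =====

-- mismatch count over a zip is symmetric in the two lists
theorem zip_count_symm (xs ys : List Char) (acc : Int) :
    (xs.zip ys).foldl (fun c p => if p.1 ≠ p.2 then c + 1 else c) acc
      = (ys.zip xs).foldl (fun c p => if p.1 ≠ p.2 then c + 1 else c) acc := by
  induction xs generalizing ys acc with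
  | nil => cases ys <;> simp [List.zip]
  | cons a xs ih =>
    cases ys with
    | nil => simp [List.zip]
    | cons b ys =>
      simp only [List.zip_cons_cons, List.foldl_cons]
      rw [ih]
      congr 1
      by_cases h : a = b <;> simp [h, Ne, eq_comm]

theorem hamming_eq (mot w : String) : hamming mot w = distance_mots mot w := by
  unfold hamming distance_mots
  exact zip_count_symm _ _ _

-- the candidate sublist
def cands (mot : String) (ls : List String) : List String :=
  ls.filter (fun j => mot.length == j.length)

theorem foldA_eq (mot : String) (ls : List String) (v : List Int) (v1 : List String) :
    ls.foldl
      (fun (s : List Int × List String) j =>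
        if mot.length = j.length then (s.1 ++ [distance_mots mot j], s.2 ++ [j]) else s)
      (v, v1)
    = (v ++ (cands mot ls).map (distance_mots mot), v1 ++ cands mot ls) := by
  induction ls generalizing v v1 with
  | nil => simp [cands]
  | cons j ls ih =>
    simp only [List.foldl_cons]
    by_cases h : mot.length = j.length
    · rw [if_pos h, ih]
      have hc : cands mot (j :: ls) = j :: cands mot ls := by
        simp only [cands, List.filter_cons]
        rw [if_pos (by simp [h])]
      rw [hc]; simp
    · rw [if_neg h, ih]
      have hc : cands mot (j :: ls) = cands mot ls := by
        simp only [cands, List.filter_cons]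
        rw [if_neg (by simp [h])]
      rw [hc]

theorem foldB_filter (mot : String) (ls : List String) (init : Option (String × Int)) :
    ls.foldl
      (fun (best : Option (String × Int)) w =>
        if w.length = mot.length then
          let d := hamming mot w
          match best with
          | none => some (w, d)
          | some (_, bd) => if d < bd then some (w, d) else best
        else best) init
    = (cands mot ls).foldl
      (fun (best : Option (String × Int)) w =>
        let d := hamming mot w
        match best with
        | none => some (w, d)
        | some (_, bd) => if d < bd then some (w, d) else best) init := by
  induction ls generalizing init with
  | nil => simp [cands]
  | cons j ls ih =>
    simp only [List.foldl_cons]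
    by_cases h : mot.length = j.length
    · rw [if_pos h.symm]
      have hc : cands mot (j :: ls) = j :: cands mot ls := by
        simp only [cands, List.filter_cons]
        rw [if_pos (by simp [h])]
      rw [hc, List.foldl_cons, ih]
    · rw [if_neg (fun e => h e.symm), ih]
      have hc : cands mot (j :: ls) = cands mot ls := by
        simp only [cands, List.filter_cons]
        rw [if_neg (by simp [h])]
      rw [hc]

-- B's loop on the candidate list, Option stripped
def runB (d : String → Int) : String → Int → List String → String × Int
  | bw, bd, [] => (bw, bd)
  | bw, bd, w :: rest => if d w < bd then runB d w (d w) rest else runB d bw bd rest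

theorem foldB_runB (d : String → Int) (rest : List String) (bw : String) (bd : Int) :
    rest.foldl
      (fun (best : Option (String × Int)) w =>
        let dw := d w
        match best with
        | none => some (w, dw)
        | some (_, b) => if dw < b then some (w, dw) else best) (some (bw, bd))
    = some (runB d bw bd rest) := by
  induction rest generalizing bw bd with
  | nil => simp [runB]
  | cons w rest ih =>
    by_cases h : d w < bd <;> simp [runB, h, ih]

theorem foldl_min_le_init (l : List Int) (init : Int) : l.foldl min init ≤ init := by
  induction l generalizing init with
  | nil => simp
  | cons x l ih => exact le_trans (ih (min init x)) (min_le_left _ _)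

-- core: A's min-then-first-scan equals B's running first minimum
theorem core (d : String → Int) (rest : List String) (bw : String) (bd : Int) (hbd : bd = d bw) :
    pickA ((rest.map d).foldl min bd) (((bw :: rest).map d).zip (bw :: rest))
      = (runB d bw bd rest).1 := by
  subst hbd
  induction rest generalizing bw with
  | nil => simp [pickA, runB]
  | cons w rest ih =>
    simp only [List.map_cons, List.foldl_cons, List.zip_cons_cons, pickA, runB]
    by_cases h : d w < d bw
    · rw [min_eq_right (le_of_lt h), if_pos h]
      have hle : (rest.map d).foldl min (d w) ≤ d w := foldl_min_le_init _ _
      have hne : ¬ (rest.map d).foldl min (d w) = d bw := by omega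
      rw [if_neg hne]
      have := ih w
      simp only [List.map_cons, List.zip_cons_cons, pickA] at this
      exact this
    · rw [min_eq_left (le_of_not_gt h), if_neg h]
      have hle : (rest.map d).foldl min (d bw) ≤ d bw := foldl_min_le_init _ _
      have hbdw : d bw ≤ d w := le_of_not_gt h
      have := ih bw
      simp only [List.map_cons, List.zip_cons_cons, pickA] at this
      by_cases he : (rest.map d).foldl min (d bw) = d bw
      · rw [if_pos he] at this ⊢
        exact this
      · have hnw : ¬ (rest.map d).foldl min (d bw) = d w := by omega
        rw [if_neg he] at this
        rw [if_neg he, if_neg hnw]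
        exact this

theorem pre_cands_ne (mot : String) (ls : List String) (h : Pre_correcteur mot ls) :
    cands mot ls ≠ [] := by
  unfold Pre_correcteur at h
  rw [List.any_eq_true] at h
  obtain ⟨w, hw, he⟩ := h
  have : w ∈ cands mot ls := by
    unfold cands
    rw [List.mem_filter]
    exact ⟨hw, by simp only [beq_iff_eq] at he ⊢; omega⟩
  intro hnil
  rw [hnil] at this
  exact absurd this (List.not_mem_nil)

-- ===== VERDICT (by name: the statement is the Claim_ definition above) =====
theorem correcteur_spec : Claim_equal_correcteur := by
  intro mot ls _ hpre
  unfold Spec_correcteur correcteur correcteur_alt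
  rw [foldA_eq, foldB_filter]
  simp only [List.nil_append]
  have hcongr : (cands mot ls).foldl
      (fun (best : Option (String × Int)) w =>
        let d := hamming mot w
        match best with
        | none => some (w, d)
        | some (_, bd) => if d < bd then some (w, d) else best) none
    = (cands mot ls).foldl
      (fun (best : Option (String × Int)) w =>
        let d := distance_mots mot w
        match best with
        | none => some (w, d)
        | some (_, bd) => if d < bd then some (w, d) else best) none := by
    apply PySem.List.foldl_congr_mem
    intro acc x _
    simp [hamming_eq]
  rw [hcongr]
  obtain ⟨c0, rest, hcs⟩ := List.exists_cons_of_ne_nil (pre_cands_ne mot ls hpre)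
  rw [hcs]
  rw [List.map_cons, PySem.List.min?_id_cons]
  simp only [List.foldl_cons]
  rw [foldB_runB (distance_mots mot) rest c0 (distance_mots mot c0)]
  have := core (distance_mots mot) rest c0 (distance_mots mot c0) rfl
  simp only [List.map_cons] at this
  exact this
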